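-- pv_equiv track=rewrite | github.com/EliseySoft/pattern_matching | one_rep_var_patterns/suffix_array.py | split_suffix_array
-- ===== SOURCE A (Python) =====
-- def split_suffix_array(suffix_array: list[int], common_prefix_lens: list[int], l: int) -> list[list[int]]:
--     """Функция, которая делит суффиксный массив на кластеры"""
--
--     clusters = []
--     curr_cluster = []
--     for i in range(len(common_prefix_lens)):
--         if common_prefix_lens[i] == 0:
--             if curr_cluster:
--                 clusters.append(curr_cluster)
--                 curr_cluster = []
--             continue
--         elif common_prefix_lens[i] >= l:
--             if not curr_cluster:
--                 curr_cluster.append(suffix_array[i])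
--                 curr_cluster.append(suffix_array[i + 1])
--             else:
--                 curr_cluster.append(suffix_array[i + 1])
--         else:
--             if curr_cluster:
--                 clusters.append(curr_cluster)
--                 curr_cluster = []
--     if curr_cluster:
--         clusters.append(curr_cluster)
--     return clusters
-- ===== SOURCE B (Python) =====
-- def split_suffix_array(suffix_array: list[int], common_prefix_lens: list[int], l: int) -> list[list[int]]:
--     """Run-based rewrite: find maximal runs of cluster-forming indices, then materialize each cluster."""
--     good = [c != 0 and c >= l for c in common_prefix_lens]
--     n = len(good)
--     runs = []
--     i = 0
--     while i < n:
--         if good[i]: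
--             k = 0
--             while i + 1 + k < n and good[i + 1 + k]:
--                 k += 1
--             runs.append((i, i + k))
--             i = i + k + 1
--         else:
--             i += 1
--     return [[suffix_array[j] for j in range(a, b + 2)] for a, b in runs]
-- ===== Notes on version B (the rewrite author's own statement) =====
-- stated objective: alternative
-- what changed: Replaces A's single stateful loop that grows/flushes a current cluster with a two-phase scheme: first find the maximal runs of indices with common_prefix_lens[i] != 0 and >= l, then materialize each run (a,b) directly as suffix_array[a..b+1].
import Mathlib
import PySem

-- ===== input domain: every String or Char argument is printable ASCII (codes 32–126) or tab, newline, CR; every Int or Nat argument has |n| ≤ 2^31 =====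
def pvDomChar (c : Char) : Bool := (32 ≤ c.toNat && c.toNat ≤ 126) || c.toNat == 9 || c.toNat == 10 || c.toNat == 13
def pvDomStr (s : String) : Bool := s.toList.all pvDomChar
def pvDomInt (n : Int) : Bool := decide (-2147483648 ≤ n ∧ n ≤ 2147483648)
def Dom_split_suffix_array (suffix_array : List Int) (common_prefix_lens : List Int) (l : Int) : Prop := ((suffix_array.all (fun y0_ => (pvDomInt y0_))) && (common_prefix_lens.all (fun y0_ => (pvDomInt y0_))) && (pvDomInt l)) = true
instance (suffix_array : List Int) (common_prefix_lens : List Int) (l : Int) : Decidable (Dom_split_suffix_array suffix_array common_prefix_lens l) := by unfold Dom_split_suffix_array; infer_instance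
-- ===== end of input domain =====

-- B rewrites A's stateful flush loop as: compute the maximal runs of cluster-forming
-- indices, then materialize each run's cluster directly (objective: alternative decomposition).

-- ===== PORT A =====
-- totalized list read: Python raises IndexError where this yields the default; Pre_ excludes those inputs
def pvGetD (xs : List Int) (i : Nat) : Int := (PySem.List.pyGet? xs (i : Int)).getD 0

-- the for-loop of A as structural recursion over common_prefix_lens carrying (i, clusters, curr)
def pvLoopA (sa : List Int) (l : Int) : List Int → Nat → List (List Int) → List Int → List (List Int) × List Int
  | [], _, clusters, curr => (clusters, curr)
  | c :: rest, i, clusters, curr =>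
    if c = 0 then
      if curr ≠ [] then pvLoopA sa l rest (i+1) (clusters ++ [curr]) []
      else pvLoopA sa l rest (i+1) clusters curr
    else if l ≤ c then
      if curr = [] then pvLoopA sa l rest (i+1) clusters [pvGetD sa i, pvGetD sa (i+1)]
      else pvLoopA sa l rest (i+1) clusters (curr ++ [pvGetD sa (i+1)])
    else
      if curr ≠ [] then pvLoopA sa l rest (i+1) (clusters ++ [curr]) []
      else pvLoopA sa l rest (i+1) clusters curr

def split_suffix_array (suffix_array : List Int) (common_prefix_lens : List Int) (l : Int) : List (List Int) :=
  let st := pvLoopA suffix_array l common_prefix_lens 0 [] []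
  if st.2 ≠ [] then st.1 ++ [st.2] else st.1

-- ===== PORT B =====
-- length of the leading all-true prefix (B's inner while loop)
def pvTrueLen : List Bool → Nat
  | [] => 0
  | b :: rest => if b then pvTrueLen rest + 1 else 0

-- B's outer while loop: the maximal runs (a, b) of true entries, as index pairs
def pvRuns : List Bool → Nat → List (Nat × Nat)
  | [], _ => []
  | b :: rest, i =>
    if b then
      (i, i + pvTrueLen rest) :: pvRuns (rest.drop (pvTrueLen rest)) (i + pvTrueLen rest + 1)
    else
      pvRuns rest (i + 1)
  termination_by g _ => g.length
  decreasing_by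
    · simp [List.length_drop]
    · simp

-- [suffix_array[j] for j in range(a, b + 2)]
def pvCluster (sa : List Int) (ab : Nat × Nat) : List Int :=
  (List.range' ab.1 (ab.2 + 2 - ab.1)).map (pvGetD sa)

def split_suffix_array_alt (suffix_array : List Int) (common_prefix_lens : List Int) (l : Int) : List (List Int) :=
  (pvRuns (common_prefix_lens.map fun c => decide (c ≠ 0 ∧ l ≤ c)) 0).map (pvCluster suffix_array)

-- ===== PRECONDITION & SPEC =====
-- Pre_: exactly the inputs where Python A returns (no IndexError): every cluster-forming
-- index i needs suffix_array[i+1] to exist.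
def Pre_split_suffix_array (suffix_array : List Int) (common_prefix_lens : List Int) (l : Int) : Prop :=
  ∀ i : Nat, i < common_prefix_lens.length →
    (common_prefix_lens.getD i 0 ≠ 0 ∧ l ≤ common_prefix_lens.getD i 0) → i + 1 < suffix_array.length
instance (suffix_array : List Int) (common_prefix_lens : List Int) (l : Int) : Decidable (Pre_split_suffix_array suffix_array common_prefix_lens l) := by unfold Pre_split_suffix_array; infer_instance

def pvWitness_split_suffix_array : List Int × List Int × Int := ([3, 1, 4, 1, 5], [2, 2, 0, 1], 2)

def Spec_split_suffix_array (suffix_array : List Int) (common_prefix_lens : List Int) (l : Int) (out : List (List Int)) : Prop := out = split_suffix_array_alt suffix_array common_prefix_lens l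
instance (suffix_array : List Int) (common_prefix_lens : List Int) (l : Int) (out : List (List Int)) : Decidable (Spec_split_suffix_array suffix_array common_prefix_lens l out) := by unfold Spec_split_suffix_array; infer_instance

-- ===== CLAIM (what is proved, stated in full; the proofs are below) =====
def Claim_equal_split_suffix_array : Prop := ∀ (suffix_array : List Int) (common_prefix_lens : List Int) (l : Int), Dom_split_suffix_array suffix_array common_prefix_lens l → Pre_split_suffix_array suffix_array common_prefix_lens l → Spec_split_suffix_array suffix_array common_prefix_lens l (split_suffix_array suffix_array common_prefix_lens l)

-- ===== LEMMAS AND PROOFS =====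

-- the final flush of A
def pvFinish (st : List (List Int) × List Int) : List (List Int) :=
  if st.2 ≠ [] then st.1 ++ [st.2] else st.1

-- the partial cluster built while scanning a run that started at index a, after reading index b
def pvSeg (sa : List Int) (a b : Nat) : List Int :=
  (List.range' a (b + 1 - a)).map (pvGetD sa)

theorem pvRuns_nil (i : Nat) : pvRuns [] i = [] := by simp [pvRuns]

theorem pvRuns_false (gs : List Bool) (i : Nat) : pvRuns (false :: gs) i = pvRuns gs (i + 1) := by
  simp [pvRuns]

theorem pvRuns_true (gs : List Bool) (i : Nat) :
    pvRuns (true :: gs) i =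
      (i, i + pvTrueLen gs) :: pvRuns (gs.drop (pvTrueLen gs)) (i + pvTrueLen gs + 1) := by
  simp [pvRuns]

theorem pvSeg_snoc (sa : List Int) (a b : Nat) (h : a ≤ b) :
    pvSeg sa a b ++ [pvGetD sa (b + 1)] = pvSeg sa a (b + 1) := by
  unfold pvSeg
  have h2 : b + 1 + 1 - a = (b + 1 - a) + 1 := by omega
  have h3 : a + (b + 1 - a) = b + 1 := by omega
  rw [h2, List.range'_1_concat, h3, List.map_append]
  rfl

theorem pvSeg_ne_nil (sa : List Int) (a b : Nat) (h : a ≤ b) : pvSeg sa a b ≠ [] := by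
  unfold pvSeg
  simp only [ne_eq, List.map_eq_nil_iff, List.range'_eq_nil_iff]
  omega

theorem pvCluster_eq_seg (sa : List Int) (a b : Nat) : pvCluster sa (a, b) = pvSeg sa a (b + 1) := by
  unfold pvCluster pvSeg
  rfl

-- joint loop invariant: A's loop from any state equals clusters ++ B's runs of the remainder
theorem pvLoop_main (sa : List Int) (l : Int) (cpl : List Int) :
    (∀ (i : Nat) (clusters : List (List Int)),
      pvFinish (pvLoopA sa l cpl i clusters []) =
        clusters ++ (pvRuns (cpl.map fun c => decide (c ≠ 0 ∧ l ≤ c)) i).map (pvCluster sa)) ∧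
    (∀ (i a : Nat) (clusters : List (List Int)), a ≤ i →
      pvFinish (pvLoopA sa l cpl i clusters (pvSeg sa a i)) =
        clusters ++ [pvSeg sa a (i + pvTrueLen (cpl.map fun c => decide (c ≠ 0 ∧ l ≤ c)))] ++
          (pvRuns ((cpl.map fun c => decide (c ≠ 0 ∧ l ≤ c)).drop
              (pvTrueLen (cpl.map fun c => decide (c ≠ 0 ∧ l ≤ c))))
            (i + pvTrueLen (cpl.map fun c => decide (c ≠ 0 ∧ l ≤ c)))).map (pvCluster sa)) := by
  induction cpl with
  | nil =>
    constructor
    · intro i clusters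
      simp [pvLoopA, pvFinish, pvRuns_nil]
    · intro i a clusters ha
      simp [pvLoopA, pvFinish, pvSeg_ne_nil sa a i ha, pvTrueLen, pvRuns_nil]
  | cons c rest ih =>
    obtain ⟨ih1, ih2⟩ := ih
    constructor
    · intro i clusters
      by_cases hg : c ≠ 0 ∧ l ≤ c
      · -- head is cluster-forming: start a run
        obtain ⟨hc0, hcl⟩ := hg
        have hA : pvLoopA sa l (c :: rest) i clusters [] =
            pvLoopA sa l rest (i + 1) clusters [pvGetD sa i, pvGetD sa (i + 1)] := by
          simp [pvLoopA, hc0, hcl]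
        have hseg : [pvGetD sa i, pvGetD sa (i + 1)] = pvSeg sa i (i + 1) := by
          simp [pvSeg]
          have : i + 1 + 1 - i = 2 := by omega
          rw [this]
          simp [List.range']
        rw [hA, hseg, ih2 (i + 1) i clusters (by omega)]
        have hmap : (c :: rest).map (fun c => decide (c ≠ 0 ∧ l ≤ c)) =
            true :: rest.map (fun c => decide (c ≠ 0 ∧ l ≤ c)) := by
          simp [hc0, hcl]
        rw [hmap, pvRuns_true]
        simp only [List.map_cons, pvCluster_eq_seg]
        have : i + 1 + pvTrueLen (rest.map fun c => decide (c ≠ 0 ∧ l ≤ c)) =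
            i + pvTrueLen (rest.map fun c => decide (c ≠ 0 ∧ l ≤ c)) + 1 := by omega
        rw [this]
        simp
      · -- head flushes (empty curr: no-op)
        have hA : pvLoopA sa l (c :: rest) i clusters [] = pvLoopA sa l rest (i + 1) clusters [] := by
          by_cases hc0 : c = 0
          · simp [pvLoopA, hc0]
          · have hcl : ¬ l ≤ c := fun h => hg ⟨hc0, h⟩
            simp [pvLoopA, hc0, hcl]
        have hmap : (c :: rest).map (fun c => decide (c ≠ 0 ∧ l ≤ c)) =
            false :: rest.map (fun c => decide (c ≠ 0 ∧ l ≤ c)) := by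
          simp only [List.map_cons, List.cons.injEq, and_true]
          exact decide_eq_false hg
        rw [hA, ih1 (i + 1) clusters, hmap, pvRuns_false]
    · intro i a clusters ha
      have hne := pvSeg_ne_nil sa a i ha
      by_cases hg : c ≠ 0 ∧ l ≤ c
      · -- run continues
        obtain ⟨hc0, hcl⟩ := hg
        have hA : pvLoopA sa l (c :: rest) i clusters (pvSeg sa a i) =
            pvLoopA sa l rest (i + 1) clusters (pvSeg sa a i ++ [pvGetD sa (i + 1)]) := by
          simp [pvLoopA, hc0, hcl, hne]
        rw [hA, pvSeg_snoc sa a i ha, ih2 (i + 1) a clusters (by omega)]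
        have hmap : (c :: rest).map (fun c => decide (c ≠ 0 ∧ l ≤ c)) =
            true :: rest.map (fun c => decide (c ≠ 0 ∧ l ≤ c)) := by
          simp [hc0, hcl]
        rw [hmap]
        have htl : pvTrueLen (true :: rest.map fun c => decide (c ≠ 0 ∧ l ≤ c)) =
            pvTrueLen (rest.map fun c => decide (c ≠ 0 ∧ l ≤ c)) + 1 := by
          simp [pvTrueLen]
        rw [htl]
        have h1 : i + (pvTrueLen (rest.map fun c => decide (c ≠ 0 ∧ l ≤ c)) + 1) =
            i + 1 + pvTrueLen (rest.map fun c => decide (c ≠ 0 ∧ l ≤ c)) := by omega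
        rw [h1, List.drop_succ_cons]
      · -- run ends: flush pvSeg sa a i
        have hA : pvLoopA sa l (c :: rest) i clusters (pvSeg sa a i) =
            pvLoopA sa l rest (i + 1) (clusters ++ [pvSeg sa a i]) [] := by
          by_cases hc0 : c = 0
          · simp [pvLoopA, hc0, hne]
          · have hcl : ¬ l ≤ c := fun h => hg ⟨hc0, h⟩
            simp [pvLoopA, hc0, hcl, hne]
        have hmap : (c :: rest).map (fun c => decide (c ≠ 0 ∧ l ≤ c)) =
            false :: rest.map (fun c => decide (c ≠ 0 ∧ l ≤ c)) := by
          simp only [List.map_cons, List.cons.injEq, and_true]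
          exact decide_eq_false hg
        rw [hA, ih1 (i + 1) (clusters ++ [pvSeg sa a i]), hmap]
        simp [pvTrueLen, pvRuns_false]

-- ===== VERDICT (by name: the statement is the Claim_ definition above) =====
theorem split_suffix_array_spec : Claim_equal_split_suffix_array := by
  intro sa cpl l _ _
  unfold Spec_split_suffix_array split_suffix_array split_suffix_array_alt
  exact (pvLoop_main sa l cpl).1 0 []
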